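-- pv_equiv track=rewrite | github.com/ttieli/odd-weird-numbers-proof | verify_ramsey55.py | graph6_to_adjacency
-- ===== SOURCE A (Python) =====
-- def graph6_to_adjacency(g6_string):
--     """将 graph6 格式字符串转为邻接矩阵"""
--     s = g6_string.strip()
--     idx = 0
--
--     # 解析顶点数 n
--     if ord(s[0]) - 63 < 63:
--         n = ord(s[0]) - 63
--         idx = 1
--     elif s[0] == '~':
--         if s[1] == '~':
--             # n >= 258048
--             n = 0
--             for i in range(6):
--                 n = (n << 6) | (ord(s[2 + i]) - 63)
--             idx = 8
--         else:
--             n = 0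
--             for i in range(3):
--                 n = (n << 6) | (ord(s[1 + i]) - 63)
--             idx = 4
--     else:
--         n = ord(s[0]) - 63
--         idx = 1
--
--     # 解析邻接矩阵的上三角
--     adj = [[0] * n for _ in range(n)]
--     bits = []
--     for ch in s[idx:]:
--         val = ord(ch) - 63
--         for bit in range(5, -1, -1):
--             bits.append((val >> bit) & 1)
--
--     k = 0
--     for j in range(1, n):
--         for i in range(j):
--             if k < len(bits) and bits[k]:
--                 adj[i][j] = 1
--                 adj[j][i] = 1
--             k += 1
--
--     return n, adj
-- ===== SOURCE B (Python) =====
-- def graph6_to_adjacency(g6_string):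
--     """graph6 -> adjacency matrix by a single bit-major pass: instead of
--     iterating over matrix cells and consuming a precomputed bit table (A),
--     iterate over the bit stream itself and map each bit index to its cell
--     with a rolling column pointer (base = first bit index of column j)."""
--     s = g6_string.strip()
--
--     # parse vertex count n (A's identical first and last branches merged)
--     if s[0] == '~':
--         if s[1] == '~':
--             n = 0
--             for i in range(6):
--                 n = (n << 6) | (ord(s[2 + i]) - 63)
--             idx = 8
--         else:
--             n = 0
--             for i in range(3):
--                 n = (n << 6) | (ord(s[1 + i]) - 63)
--             idx = 4
--     else:
--         n = ord(s[0]) - 63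
--         idx = 1
--
--     adj = [[0] * n for _ in range(n)]
--     m = n * (n - 1) // 2 if n > 1 else 0   # number of upper-triangle slots
--     j, base, k = 1, 0, 0                   # bits [base, base + j) belong to column j
--     for ch in s[idx:]:
--         v = ord(ch) - 63
--         for p in (5, 4, 3, 2, 1, 0):
--             if k - base == j:              # bit k starts the next column
--                 base += j
--                 j += 1
--             if k < m and (v >> p) & 1:
--                 adj[k - base][j] = 1
--                 adj[j][k - base] = 1
--             k += 1
--     return n, adj
-- ===== Notes on version B (the rewrite author's own statement) =====
-- stated objective: alternative
-- what changed: B inverts the traversal: instead of A's cell-major nested loops over upper-triangle cells consuming a precomputed bit table, B makes a single bit-major pass over the graph6 characters and maps each bit index to its matrix cell on the fly with a rolling column pointer (base = first bit index of column j), allocating no intermediate bit list; the duplicated first/last n-parsing branches are also merged.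
import Mathlib
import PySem

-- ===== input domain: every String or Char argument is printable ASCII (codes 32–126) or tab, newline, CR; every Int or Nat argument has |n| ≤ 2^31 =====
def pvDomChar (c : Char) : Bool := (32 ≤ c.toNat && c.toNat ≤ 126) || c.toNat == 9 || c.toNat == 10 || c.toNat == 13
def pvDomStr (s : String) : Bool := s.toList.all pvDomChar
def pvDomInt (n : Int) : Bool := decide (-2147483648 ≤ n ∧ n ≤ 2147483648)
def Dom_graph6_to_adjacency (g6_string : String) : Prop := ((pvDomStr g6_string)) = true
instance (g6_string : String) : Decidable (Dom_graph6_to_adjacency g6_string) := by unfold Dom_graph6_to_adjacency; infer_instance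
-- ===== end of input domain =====

-- ===== PORT A =====
-- B inverts the traversal: A fills cell after cell from a precomputed bit table; B makes one
-- bit-major pass over the characters, mapping each bit index to its cell with a rolling
-- column pointer and no intermediate table (objective: alternative; same return value).
-- Shared trivial primitives of both ports:
-- ord(c)
def pvC2I (c : Char) : Int := (c.toNat : Int)
-- Python's  x >> k  for k ≥ 0: core Lean's Int >>> Nat shift (exact per PySem), pinned to the
-- Int/Nat instance so both ports use the identical operation
def pvShr (x : Int) (k : Nat) : Int := @HShiftRight.hShiftRight Int Nat Int _ x k
-- the 'for i in range(cnt): n = (n << 6) | (ord(s[off+i]) - 63)' loop (identical in A and B;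
-- s[off+i] via getD is exact under Pre_, which guarantees the index is in range)
def pvScanN (s : List Char) (off : Nat) (cnt : Int) : Int :=
  (PySem.List.pyRange 0 cnt 1).foldl
    (fun n i => PySem.Int.bor (n <<< (6 : Nat)) (pvC2I (s.getD (off + i.toNat) ' ') - 63)) 0
-- adj[i][j] = 1 (row read via getD: exact, the executed indices satisfy 0 ≤ i < j < n = len adj)
def pvSet2 (adj : List (List Int)) (i j : Nat) : List (List Int) :=
  adj.set i ((adj.getD i []).set j 1)

-- A's n-parsing (s[0], s[1] via getD: exact under Pre_)
def pvHeaderA (s : List Char) : Int × Nat :=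
  if pvC2I (s.getD 0 ' ') - 63 < 63 then (pvC2I (s.getD 0 ' ') - 63, 1)
  else if s.getD 0 ' ' = '~' then
    if s.getD 1 ' ' = '~' then (pvScanN s 2 6, 8)
    else (pvScanN s 1 3, 4)
  else (pvC2I (s.getD 0 ' ') - 63, 1)

-- A's bits pre-expansion: for ch in s[idx:] (= drop idx, idx ≥ 0): for bit in range(5,-1,-1): append
def pvBitsA (s : List Char) (idx : Nat) : List Int :=
  (s.drop idx).foldl
    (fun bits ch =>
      (PySem.List.pyRange 5 (-1) (-1)).foldl
        (fun bits bit => bits ++ [PySem.Int.band (pvShr (pvC2I ch - 63) bit.toNat) 1]) bits) []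

-- A's fill loop over the upper triangle, with the running counter k
def pvFillA (bits : List Int) (n : Int) : List (List Int) :=
  ((PySem.List.pyRange 1 n 1).foldl
    (fun (st : List (List Int) × Nat) j =>
      (PySem.List.pyRange 0 j 1).foldl
        (fun st i =>
          if st.2 < bits.length ∧ bits.getD st.2 0 ≠ 0 then
            (pvSet2 (pvSet2 st.1 i.toNat j.toNat) j.toNat i.toNat, st.2 + 1)
          else (st.1, st.2 + 1)) st)
    (List.replicate n.toNat (List.replicate n.toNat (0 : Int)), 0)).1

def graph6_to_adjacency (g6_string : String) : Int × List (List Int) :=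
  ((pvHeaderA (PySem.Chars.strip g6_string.toList)).1,
   pvFillA (pvBitsA (PySem.Chars.strip g6_string.toList)
       (pvHeaderA (PySem.Chars.strip g6_string.toList)).2)
     (pvHeaderA (PySem.Chars.strip g6_string.toList)).1)

-- ===== PORT B =====
-- B's n-parsing: A's identical first and last branches merged into the else
def pvHeaderB (s : List Char) : Int × Nat :=
  if s.getD 0 ' ' = '~' then
    if s.getD 1 ' ' = '~' then (pvScanN s 2 6, 8)
    else (pvScanN s 1 3, 4)
  else (pvC2I (s.getD 0 ' ') - 63, 1)

-- B's per-bit body: advance the column pointer (base = first bit index of column j) when bit k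
-- starts the next column, then set the cell (k - base, j) when the bit is set and k < m
def pvBStep (m : Int) (st : List (List Int) × Nat × Nat × Nat) (b : Int) :
    List (List Int) × Nat × Nat × Nat :=
  match st with
  | (adj, j, base, k) =>
    let jb := if k - base = j then (j + 1, base + j) else (j, base)
    ((if (k : Int) < m ∧ b ≠ 0 then pvSet2 (pvSet2 adj (k - jb.2) jb.1) jb.1 (k - jb.2) else adj),
     jb.1, jb.2, k + 1)

-- B's single pass: for ch in s[idx:]: for p in (5,4,3,2,1,0): ... (v >> p) & 1 ...
def pvFillB (s : List Char) (idx : Nat) (n : Int) : List (List Int) :=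
  ((s.drop idx).foldl
    (fun st ch =>
      ([5, 4, 3, 2, 1, 0] : List Nat).foldl
        (fun st p =>
          pvBStep (if 1 < n then PySem.Int.floordiv (n * (n - 1)) 2 else 0) st
            (PySem.Int.band (pvShr (pvC2I ch - 63) p) 1)) st)
    (List.replicate n.toNat (List.replicate n.toNat (0 : Int)), 1, 0, 0)).1

def graph6_to_adjacency_alt (g6_string : String) : Int × List (List Int) :=
  ((pvHeaderB (PySem.Chars.strip g6_string.toList)).1,
   pvFillB (PySem.Chars.strip g6_string.toList)
     (pvHeaderB (PySem.Chars.strip g6_string.toList)).2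
     (pvHeaderB (PySem.Chars.strip g6_string.toList)).1)

-- ===== PRECONDITION & SPEC =====
-- Pre_ excludes exactly the inputs on which the Python A raises IndexError: an input whose
-- strip is empty (s[0]), or a '~'-headed strip too short for the extended n-field (s[1..3]
-- needs length ≥ 4, s[2..7] needs length ≥ 8).  B raises on exactly the same inputs.
def Pre_graph6_to_adjacency (g6_string : String) : Prop :=
  let s := PySem.Chars.strip g6_string.toList
  1 ≤ s.length ∧
    (s.getD 0 ' ' = '~' →
      2 ≤ s.length ∧ (s.getD 1 ' ' = '~' → 8 ≤ s.length) ∧ (¬ s.getD 1 ' ' = '~' → 4 ≤ s.length))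
instance (g6_string : String) : Decidable (Pre_graph6_to_adjacency g6_string) := by
  unfold Pre_graph6_to_adjacency; infer_instance
def pvWitness_graph6_to_adjacency : String := "DQc"

def Spec_graph6_to_adjacency (g6_string : String) (out : Int × List (List Int)) : Prop := out = graph6_to_adjacency_alt g6_string
instance (g6_string : String) (out : Int × List (List Int)) : Decidable (Spec_graph6_to_adjacency g6_string out) := by unfold Spec_graph6_to_adjacency; infer_instance

-- ===== CLAIM (what is proved, stated in full; the proofs are below) =====
def Claim_equal_graph6_to_adjacency : Prop := ∀ (g6_string : String), Dom_graph6_to_adjacency g6_string → Pre_graph6_to_adjacency g6_string → Spec_graph6_to_adjacency g6_string (graph6_to_adjacency g6_string)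

-- ===== LEMMAS AND PROOFS =====

-- triangular numbers: pvTri j = number of upper-triangle cells in columns 1..j-1
def pvTri : Nat → Nat
  | 0 => 0
  | n + 1 => pvTri n + n

-- the cells of column j, top to bottom
def pvCol (j : Nat) : List (Nat × Nat) := (List.range' 0 j).map (fun i => (i, j))

-- all cells of columns j..n-1 in A's visiting order
def pvCellsFrom (j n : Nat) : List (Nat × Nat) := (List.range' j (n - j)).flatMap pvCol

-- cells not yet visited when the pointer is at column j, row d
def pvRem (n j d : Nat) : List (Nat × Nat) :=
  if j < n then (List.range' d (j - d)).map (fun i => (i, j)) ++ pvCellsFrom (j + 1) n else []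

-- the common normal form of both fill loops: walk cells paired with their bits
def pvZF (adj : List (List Int)) (l : List ((Nat × Nat) × Int)) : List (List Int) :=
  l.foldl (fun adj cb => if cb.2 ≠ 0 then pvSet2 (pvSet2 adj cb.1.1 cb.1.2) cb.1.2 cb.1.1 else adj) adj

theorem pvTri_mono {j k : Nat} (h : j ≤ k) : pvTri j ≤ pvTri k := by
  induction k with
  | zero => interval_cases j; exact Nat.le_refl _
  | succ m ih =>
    rcases Nat.lt_or_ge j (m + 1) with h' | h'
    · have h2 := ih (by omega)
      have h3 : pvTri (m + 1) = pvTri m + m := rfl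
      omega
    · have hj : j = m + 1 := by omega
      subst hj; exact Nat.le_refl _

theorem pvCF_cons {j n : Nat} (h : j < n) :
    pvCellsFrom j n = pvCol j ++ pvCellsFrom (j + 1) n := by
  unfold pvCellsFrom
  rw [show n - j = (n - (j+1)) + 1 by omega, List.range'_succ, List.flatMap_cons]

theorem pvCF_len : ∀ (k j : Nat), (pvCellsFrom j (j + k)).length = pvTri (j + k) - pvTri j := by
  intro k
  induction k with
  | zero => intro j; simp [pvCellsFrom]
  | succ m ih =>
    intro j
    rw [pvCF_cons (by omega), List.length_append]
    have h1 := ih (j + 1)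
    have h2 : (pvCol j).length = j := by simp [pvCol]
    have h3 : pvTri (j + 1) = pvTri j + j := rfl
    have h4 : pvTri j ≤ pvTri (j + 1) := pvTri_mono (by omega)
    have h5 : pvTri (j + 1) ≤ pvTri (j + 1 + m) := pvTri_mono (by omega)
    rw [show j + (m + 1) = (j + 1) + m by omega] at *
    omega

theorem pvRem_eq_CF (n : Nat) : pvRem n 1 0 = pvCellsFrom 1 n := by
  unfold pvRem
  by_cases h : 1 < n
  · rw [if_pos h, pvCF_cons h]; rfl
  · rw [if_neg h]
    unfold pvCellsFrom
    rw [show n - 1 = 0 by omega]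
    rfl

theorem pvRem_adv (n j : Nat) : pvRem n j j = pvRem n (j + 1) 0 := by
  unfold pvRem
  by_cases h1 : j + 1 < n
  · rw [if_pos (by omega), if_pos h1, pvCF_cons h1]
    simp [pvCol]
  · by_cases h2 : j < n
    · rw [if_pos h2, if_neg h1]
      unfold pvCellsFrom
      rw [show n - (j+1) = 0 by omega]
      simp
    · rw [if_neg h2, if_neg h1]

theorem pvRem_cons {n j d : Nat} (hd : d < j) (hj : j < n) :
    pvRem n j d = (d, j) :: pvRem n j (d + 1) := by
  unfold pvRem
  rw [if_pos hj, if_pos hj, show j - d = (j - (d+1)) + 1 by omega, List.range'_succ]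
  rfl

theorem pvRem_nil {n j d : Nat} (hd : d ≤ j) (h : pvTri n ≤ pvTri j + d) : pvRem n j d = [] := by
  unfold pvRem
  by_cases hj : j < n
  · rw [if_pos hj]
    have h1 := pvCF_len (n - (j+1)) (j+1)
    rw [show (j+1) + (n - (j+1)) = n by omega] at h1
    have h2 : pvTri (j+1) = pvTri j + j := rfl
    have h3 : pvTri (j+1) ≤ pvTri n := pvTri_mono (by omega)
    have h4 : j - d = 0 := by omega
    have h5 : (pvCellsFrom (j+1) n).length = 0 := by omega
    rw [h4, List.eq_nil_of_length_eq_zero h5]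
    simp
  · rw [if_neg hj]

theorem pvM_eq (n : Int) :
    (if 1 < n then PySem.Int.floordiv (n * (n - 1)) 2 else 0) = (pvTri n.toNat : Int) := by
  by_cases h : 1 < n
  · rw [if_pos h]
    set N := n.toNat with hN
    have hn : n = (N : Int) := by omega
    have hN2 : 2 ≤ N := by omega
    have htri : 2 * pvTri N = N * (N - 1) := by
      clear_value N; clear hn hN2 h hN
      induction N with
      | zero => rfl
      | succ m ih =>
        show 2 * (pvTri m + m) = (m + 1) * m
        cases m with
        | zero => rfl
        | succ q =>
          have : 2 * pvTri (q+1) = (q+1) * q := by simpa using ih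
          nlinarith [this]
    rw [PySem.Int.floordiv_eq_ediv_of_pos (by omega), hn]
    have hcast : (N : Int) * ((N : Int) - 1) = ((N * (N - 1) : Nat) : Int) := by
      push_cast [Nat.cast_sub (by omega : 1 ≤ N)]; ring
    rw [hcast, show (2:Int) = ((2:Nat):Int) from rfl, Int.ofNat_ediv_ofNat]
    congr 1
    omega
  · rw [if_neg h]
    have : n.toNat = 0 ∨ n.toNat = 1 := by omega
    rcases this with h1 | h1 <;> rw [h1] <;> rfl

-- the 6 bits of one graph6 character, high bit first (exactly what A's inner loop appends)
def pvChunk (ch : Char) : List Int :=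
  (PySem.List.pyRange 5 (-1) (-1)).map
    (fun bit => PySem.Int.band (pvShr (pvC2I ch - 63) bit.toNat) 1)

theorem pvBitsA_eq (s : List Char) (idx : Nat) :
    pvBitsA s idx = (s.drop idx).flatMap pvChunk := by
  unfold pvBitsA
  have hfun : (fun (bits : List Int) ch =>
      (PySem.List.pyRange 5 (-1) (-1)).foldl
        (fun bits bit => bits ++ [PySem.Int.band (pvShr (pvC2I ch - 63) bit.toNat) 1]) bits)
      = fun bits ch => bits ++ pvChunk ch := by
    funext bits ch
    exact PySem.List.foldl_append_singleton_eq_map _ _ _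
  rw [hfun, PySem.List.foldl_append_eq_flatMap]
  simp

theorem pvChunk_eq_map (ch : Char) :
    pvChunk ch = ([5, 4, 3, 2, 1, 0] : List Nat).map
      (fun p => PySem.Int.band (pvShr (pvC2I ch - 63) p) 1) := by
  unfold pvChunk
  rw [show PySem.List.pyRange 5 (-1) (-1) = [5, 4, 3, 2, 1, 0] from by decide]
  rfl

-- A's counter-driven fold over any cell list is the zip normal form
theorem pvA1 (bits : List Int) (cs : List (Nat × Nat)) :
    ∀ (adj : List (List Int)) (k0 : Nat),
    (cs.foldl (fun st c =>
        if st.2 < bits.length ∧ bits.getD st.2 0 ≠ 0 then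
          (pvSet2 (pvSet2 st.1 c.1 c.2) c.2 c.1, st.2 + 1)
        else (st.1, st.2 + 1)) (adj, k0)).1
      = pvZF adj (cs.zip (bits.drop k0)) := by
  induction cs with
  | nil => intro adj k0; simp [pvZF]
  | cons c cs ih =>
    intro adj k0
    rw [List.foldl_cons]
    by_cases hk : k0 < bits.length
    · rw [List.drop_eq_getElem_cons hk, List.zip_cons_cons]
      have hgd : bits.getD k0 0 = bits[k0] := List.getD_eq_getElem bits 0 hk
      by_cases hb : bits[k0] ≠ 0
      · rw [if_pos ⟨hk, by rw [hgd]; exact hb⟩]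
        show (cs.foldl _ (pvSet2 (pvSet2 adj c.1 c.2) c.2 c.1, k0 + 1)).1 = _
        rw [ih]
        show _ = pvZF (if bits[k0] ≠ 0 then _ else _) (cs.zip (bits.drop (k0+1)))
        rw [if_pos hb]
      · rw [if_neg (by rw [hgd]; tauto)]
        show (cs.foldl _ (adj, k0 + 1)).1 = _
        rw [ih]
        show _ = pvZF (if bits[k0] ≠ 0 then _ else _) (cs.zip (bits.drop (k0+1)))
        rw [if_neg hb]
    · have hnil : bits.drop k0 = [] := List.drop_eq_nil_of_le (by omega)
      have hnil2 : bits.drop (k0 + 1) = [] := List.drop_eq_nil_of_le (by omega)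
      rw [if_neg (by tauto)]
      show (cs.foldl _ (adj, k0 + 1)).1 = _
      rw [ih, hnil, hnil2, List.zip_nil_right, List.zip_nil_right]

theorem pvCells_eq (n : Int) :
    (PySem.List.pyRange 1 n 1).flatMap
        (fun j => (PySem.List.pyRange 0 j 1).map (fun i => (i.toNat, j.toNat)))
      = pvCellsFrom 1 n.toNat := by
  rw [PySem.List.pyRange_one, List.flatMap_map]
  unfold pvCellsFrom
  rw [List.range'_eq_map_range, List.flatMap_map]
  rw [show (n - 1).toNat = n.toNat - 1 by omega]
  apply List.flatMap_congr
  intro x hx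
  simp only [PySem.List.pyRange_one, pvCol, List.range'_eq_map_range, List.map_map]
  have h1 : (1 + (x:Int) - 0).toNat = 1 + x := by omega
  rw [h1]
  apply List.map_congr_left
  intro i hi
  simp
  omega

theorem pvA2 (bits : List Int) (n : Int) :
    pvFillA bits n
      = pvZF (List.replicate n.toNat (List.replicate n.toNat (0 : Int)))
          ((pvCellsFrom 1 n.toNat).zip bits) := by
  unfold pvFillA
  have h1 : ∀ (st0 : List (List Int) × Nat),
      (PySem.List.pyRange 1 n 1).foldl
        (fun st j => (PySem.List.pyRange 0 j 1).foldl
          (fun st i =>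
            if st.2 < bits.length ∧ bits.getD st.2 0 ≠ 0 then
              (pvSet2 (pvSet2 st.1 i.toNat j.toNat) j.toNat i.toNat, st.2 + 1)
            else (st.1, st.2 + 1)) st) st0
      = ((PySem.List.pyRange 1 n 1).flatMap
          (fun j => (PySem.List.pyRange 0 j 1).map (fun i => (i.toNat, j.toNat)))).foldl
          (fun st (c : Nat × Nat) =>
            if st.2 < bits.length ∧ bits.getD st.2 0 ≠ 0 then
              (pvSet2 (pvSet2 st.1 c.1 c.2) c.2 c.1, st.2 + 1)
            else (st.1, st.2 + 1)) st0 := by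
    intro st0
    rw [List.foldl_flatMap]
    apply PySem.List.foldl_congr_mem
    intro st j _
    rw [List.foldl_map]
  rw [h1, pvCells_eq, pvA1]
  simp

-- B's bit-major fold maintains: base = pvTri j, k = pvTri j + d, the remaining cells are pvRem
theorem pvZF_cons (adj : List (List Int)) (x : (Nat × Nat) × Int) (l : List ((Nat × Nat) × Int)) :
    pvZF adj (x :: l)
      = pvZF (if x.2 ≠ 0 then pvSet2 (pvSet2 adj x.1.1 x.1.2) x.1.2 x.1.1 else adj) l := rfl

theorem pvBStep_adv (m : Int) (adj : List (List Int)) (j : Nat) (b : Int) :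
    pvBStep m (adj, j, pvTri j, pvTri j + j) b
      = ((if ((pvTri (j + 1) : Nat) : Int) < m ∧ b ≠ 0 then
            pvSet2 (pvSet2 adj 0 (j + 1)) (j + 1) 0 else adj),
         j + 1, pvTri (j + 1), pvTri (j + 1) + 1) := by
  have hc : pvTri j + j - pvTri j = j := by omega
  have htri : pvTri (j + 1) = pvTri j + j := rfl
  simp [pvBStep, hc, htri]

theorem pvBStep_stay (m : Int) (adj : List (List Int)) (j d : Nat) (b : Int) (h : d < j) :
    pvBStep m (adj, j, pvTri j, pvTri j + d) b
      = ((if ((pvTri j + d : Nat) : Int) < m ∧ b ≠ 0 then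
            pvSet2 (pvSet2 adj d j) j d else adj),
         j, pvTri j, pvTri j + (d + 1)) := by
  have hc : pvTri j + d - pvTri j = d := by omega
  simp [pvBStep, hc, Nat.ne_of_lt h]
  omega

theorem pvB2 (nN : Nat) :
    ∀ (bs : List Int) (adj : List (List Int)) (j d : Nat), 1 ≤ j → d ≤ j →
    (bs.foldl (pvBStep (pvTri nN : Int)) (adj, j, pvTri j, pvTri j + d)).1
      = pvZF adj ((pvRem nN j d).zip bs) := by
  intro bs
  induction bs with
  | nil => intro adj j d h1 h2; simp [pvZF]
  | cons b bs ih =>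
    intro adj j d h1 h2
    rw [List.foldl_cons]
    have htri : pvTri (j + 1) = pvTri j + j := rfl
    by_cases hd : d = j
    · subst hd
      rw [pvBStep_adv, pvRem_adv]
      by_cases hk : pvTri (d + 1) < pvTri nN
      · have hjn : d + 1 < nN := by
          by_contra hh
          have := pvTri_mono (show nN ≤ d + 1 by omega)
          omega
        have hiff : (((pvTri (d + 1) : Nat) : Int) < (pvTri nN : Int) ∧ b ≠ 0) ↔ b ≠ 0 :=
          ⟨fun h => h.2, fun h => ⟨by exact_mod_cast hk, h⟩⟩
        rw [if_congr hiff rfl rfl, ih _ (d + 1) 1 (by omega) (by omega),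
            show pvRem nN (d + 1) 0 = (0, d + 1) :: pvRem nN (d + 1) (0 + 1) from
              pvRem_cons (by omega) hjn,
            List.zip_cons_cons, pvZF_cons]
      · have hg : ¬ (((pvTri (d + 1) : Nat) : Int) < (pvTri nN : Int) ∧ b ≠ 0) := by
          rintro ⟨hlt, -⟩
          exact hk (by exact_mod_cast hlt)
        rw [if_neg hg, ih _ (d + 1) 1 (by omega) (by omega),
            pvRem_nil (by omega) (by omega), pvRem_nil (by omega) (by omega)]
        simp [pvZF]
    · have hlt : d < j := by omega
      rw [pvBStep_stay _ _ _ _ _ hlt]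
      by_cases hk : pvTri j + d < pvTri nN
      · have hjn : j < nN := by
          by_contra hh
          have := pvTri_mono (show nN ≤ j by omega)
          omega
        have hiff : (((pvTri j + d : Nat) : Int) < (pvTri nN : Int) ∧ b ≠ 0) ↔ b ≠ 0 :=
          ⟨fun h => h.2, fun h => ⟨by exact_mod_cast hk, h⟩⟩
        rw [if_congr hiff rfl rfl, ih _ j (d + 1) h1 (by omega),
            show pvRem nN j d = (d, j) :: pvRem nN j (d + 1) from pvRem_cons hlt hjn,
            List.zip_cons_cons, pvZF_cons]
      · have hg : ¬ (((pvTri j + d : Nat) : Int) < (pvTri nN : Int) ∧ b ≠ 0) := by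
          rintro ⟨hlt2, -⟩
          exact hk (by exact_mod_cast hlt2)
        rw [if_neg hg, ih _ j (d + 1) h1 (by omega),
            pvRem_nil (by omega) (by omega), pvRem_nil h2 (by omega)]
        simp [pvZF]

theorem pvB3 (s : List Char) (idx : Nat) (n : Int) :
    pvFillB s idx n
      = pvZF (List.replicate n.toNat (List.replicate n.toNat (0 : Int)))
          ((pvCellsFrom 1 n.toNat).zip ((s.drop idx).flatMap pvChunk)) := by
  unfold pvFillB
  have h1 : ∀ (st0 : List (List Int) × Nat × Nat × Nat),
      (s.drop idx).foldl
        (fun st ch => ([5, 4, 3, 2, 1, 0] : List Nat).foldl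
          (fun st p => pvBStep (if 1 < n then PySem.Int.floordiv (n * (n - 1)) 2 else 0) st
            (PySem.Int.band (pvShr (pvC2I ch - 63) p) 1)) st) st0
      = ((s.drop idx).flatMap pvChunk).foldl
          (pvBStep (if 1 < n then PySem.Int.floordiv (n * (n - 1)) 2 else 0)) st0 := by
    intro st0
    rw [List.foldl_flatMap]
    apply PySem.List.foldl_congr_mem
    intro st ch _
    rw [pvChunk_eq_map, List.foldl_map]
  rw [h1, pvM_eq]
  have h2 := pvB2 n.toNat ((s.drop idx).flatMap pvChunk)
    (List.replicate n.toNat (List.replicate n.toNat (0 : Int))) 1 0 (by omega) (by omega)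
  rw [pvRem_eq_CF] at h2
  exact h2

theorem pvFill_eq (s : List Char) (idx : Nat) (n : Int) :
    pvFillA (pvBitsA s idx) n = pvFillB s idx n := by
  rw [pvBitsA_eq, pvA2, pvB3]

theorem pvHeader_eq (s : List Char) : pvHeaderA s = pvHeaderB s := by
  unfold pvHeaderA pvHeaderB
  by_cases h : s.getD 0 ' ' = '~'
  · have hc : ¬ pvC2I (s.getD 0 ' ') - 63 < 63 := by rw [h]; decide
    rw [if_neg hc, if_pos h]
  · split_ifs <;> simp_all

-- ===== VERDICT (by name: the statement is the Claim_ definition above) =====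
theorem graph6_to_adjacency_spec : Claim_equal_graph6_to_adjacency := by
  intro g _ _
  unfold Spec_graph6_to_adjacency graph6_to_adjacency graph6_to_adjacency_alt
  rw [pvHeader_eq, pvFill_eq]
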